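-- pv_equiv track=rewrite | github.com/ludoed19/labs-3-7 | лаба 5, 7/лаба 7.py | optimized_method
-- ===== SOURCE A (Python) =====
-- from math import prod
--
-- def optimized_method(labelings, leaves, root_idx):
--     filtered = [lbl for lbl in labelings if lbl[root_idx] == max(lbl)]
--     if not filtered:
--         return []
--     last_leaf_idx = leaves[-1]
--     filtered = [lbl for lbl in filtered if lbl[last_leaf_idx] % 2 == 0]
--     if not filtered:
--         return []
--     max_product = max(prod(lbl[l] for l in leaves) for lbl in filtered)
--     return [lbl for lbl in filtered if prod(lbl[l] for l in leaves) == max_product]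
-- ===== SOURCE B (Python) =====
-- def optimized_method(labelings, leaves, root_idx):
--     # Single pass: running best leaf-product with its winners list.
--     best = None
--     winners = []
--     for lbl in labelings:
--         if lbl[root_idx] != max(lbl):
--             continue
--         if lbl[leaves[-1]] % 2 != 0:
--             continue
--         p = 1
--         for l in leaves:
--             p *= lbl[l]
--         if best is None or p > best:
--             best = p
--             winners = [lbl]
--         elif p == best:
--             winners.append(lbl)
--     return winners
-- ===== Notes on version B (the rewrite author's own statement) =====
-- stated objective: alternative
-- what changed: Replaces A's three filter passes plus a max-then-refilter (each leaf-product computed twice) by one pass that computes each qualifying labeling's leaf-product once and maintains a running best product with its winners list.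
import Mathlib
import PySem

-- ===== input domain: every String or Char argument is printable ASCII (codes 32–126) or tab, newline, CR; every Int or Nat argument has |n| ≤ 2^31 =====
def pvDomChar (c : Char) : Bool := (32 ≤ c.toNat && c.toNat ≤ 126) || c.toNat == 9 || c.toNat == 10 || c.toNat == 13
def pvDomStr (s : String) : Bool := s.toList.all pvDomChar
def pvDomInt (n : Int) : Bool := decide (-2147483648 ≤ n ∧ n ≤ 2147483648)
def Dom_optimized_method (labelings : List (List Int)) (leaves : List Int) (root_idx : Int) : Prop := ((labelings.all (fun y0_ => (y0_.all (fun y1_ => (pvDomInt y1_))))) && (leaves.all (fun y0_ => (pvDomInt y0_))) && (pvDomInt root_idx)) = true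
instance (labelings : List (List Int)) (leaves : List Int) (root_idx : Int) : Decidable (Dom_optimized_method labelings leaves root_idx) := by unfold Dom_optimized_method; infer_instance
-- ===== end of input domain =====

-- B replaces A's three filter passes plus max-then-refilter by one pass keeping a running best leaf-product with its winners list (each product computed once).


-- max(lbl) for a list of ints (total form; Pre_ guarantees lbl ≠ [] via a valid root index)
def pvMaxD (lbl : List Int) : Int := (PySem.List.max? lbl (fun y => y)).getD 0

-- prod(lbl[l] for l in leaves) (total form; Pre_ guarantees every leaf index is in range)
def pvLeafProd (lbl : List Int) (leaves : List Int) : Int :=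
  leaves.foldl (fun acc l => acc * PySem.List.pyGetD lbl l 0) 1

-- ===== PORT A =====
def optimized_method (labelings : List (List Int)) (leaves : List Int) (root_idx : Int) : List (List Int) :=
  let filtered := labelings.filter (fun lbl => PySem.List.pyGetD lbl root_idx 0 == pvMaxD lbl)
  if filtered.isEmpty then []
  else
    let last_leaf_idx := (PySem.List.pyGet? leaves (-1)).getD 0
    let filtered2 := filtered.filter (fun lbl => PySem.Int.mod (PySem.List.pyGetD lbl last_leaf_idx 0) 2 == 0)
    if filtered2.isEmpty then []
    else
      let max_product := (PySem.List.max? (filtered2.map (fun lbl => pvLeafProd lbl leaves)) (fun y => y)).getD 0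
      filtered2.filter (fun lbl => pvLeafProd lbl leaves == max_product)

-- ===== PORT B =====
-- loop body of B: skip non-qualifying lbl, else update (best, winners)
def pvStep (leaves : List Int) (root_idx : Int) (st : Option Int × List (List Int)) (lbl : List Int) : Option Int × List (List Int) :=
  if ¬ (PySem.List.pyGetD lbl root_idx 0 == pvMaxD lbl) then st
  else if ¬ (PySem.Int.mod (PySem.List.pyGetD lbl ((PySem.List.pyGet? leaves (-1)).getD 0) 0) 2 == 0) then st
  else
    let p := pvLeafProd lbl leaves
    match st.1 with
    | none => (some p, [lbl])
    | some b => if p > b then (some p, [lbl]) else if p == b then (some b, st.2 ++ [lbl]) else st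

def optimized_method_alt (labelings : List (List Int)) (leaves : List Int) (root_idx : Int) : List (List Int) :=
  (labelings.foldl (pvStep leaves root_idx) (none, [])).2

-- root-condition of the first filter (whether a labeling's root label equals its maximum)
def pvPass1 (root_idx : Int) (lbl : List Int) : Bool :=
  PySem.List.pyGetD lbl root_idx 0 == pvMaxD lbl

-- ===== PRECONDITION & SPEC =====
-- Pre_ excludes exactly the inputs where Python raises (IndexError / ValueError on max([])):
-- the root index must be valid in every labeling; for each labeling whose root label equals its
-- maximum, leaves must be nonempty with a valid last index in that labeling; and when that last
-- entry is even, every leaf index must be valid in that labeling.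
def Pre_optimized_method (labelings : List (List Int)) (leaves : List Int) (root_idx : Int) : Prop :=
  (∀ lbl ∈ labelings, PySem.Raise.InRange lbl.length root_idx) ∧
  (∀ lbl ∈ labelings, pvPass1 root_idx lbl = true →
      leaves ≠ [] ∧
      PySem.Raise.InRange lbl.length ((PySem.List.pyGet? leaves (-1)).getD 0) ∧
      (PySem.Int.mod (PySem.List.pyGetD lbl ((PySem.List.pyGet? leaves (-1)).getD 0) 0) 2 = 0 →
        ∀ l ∈ leaves, PySem.Raise.InRange lbl.length l))
instance (labelings : List (List Int)) (leaves : List Int) (root_idx : Int) : Decidable (Pre_optimized_method labelings leaves root_idx) := by unfold Pre_optimized_method; infer_instance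

def pvWitness_optimized_method : List (List Int) × List Int × Int := ([[2,1],[3,4]], [0,1], 1)

def Spec_optimized_method (labelings : List (List Int)) (leaves : List Int) (root_idx : Int) (out : List (List Int)) : Prop := out = optimized_method_alt labelings leaves root_idx
instance (labelings : List (List Int)) (leaves : List Int) (root_idx : Int) (out : List (List Int)) : Decidable (Spec_optimized_method labelings leaves root_idx out) := by unfold Spec_optimized_method; infer_instance

-- ===== CLAIM (what is proved, stated in full; the proofs are below) =====
def Claim_equal_optimized_method : Prop := ∀ (labelings : List (List Int)) (leaves : List Int) (root_idx : Int), Dom_optimized_method labelings leaves root_idx → Pre_optimized_method labelings leaves root_idx → Spec_optimized_method labelings leaves root_idx (optimized_method labelings leaves root_idx)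

-- ===== LEMMAS AND PROOFS =====

-- the combined qualification test (order matches List.filter_filter's fusion of A's two filters)
def pvQual (leaves : List Int) (root_idx : Int) (lbl : List Int) : Bool :=
  (PySem.Int.mod (PySem.List.pyGetD lbl ((PySem.List.pyGet? leaves (-1)).getD 0) 0) 2 == 0) &&
  (PySem.List.pyGetD lbl root_idx 0 == pvMaxD lbl)

-- the unguarded best/winners update, abstract in the key P
def pvRun {α : Type} (P : α → Int) (st : Option Int × List α) (x : α) : Option Int × List α :=
  match st.1 with
  | none => (some (P x), [x])
  | some b => if P x > b then (some (P x), [x]) else if P x == b then (some b, st.2 ++ [x]) else st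

theorem pvStep_eq (leaves : List Int) (root_idx : Int) (st : Option Int × List (List Int)) (lbl : List Int) :
    pvStep leaves root_idx st lbl =
      if pvQual leaves root_idx lbl then pvRun (fun y => pvLeafProd y leaves) st lbl else st := by
  simp only [pvStep, pvQual, pvRun, Bool.and_eq_true]
  split_ifs with h1 h2 h3 <;> simp_all

theorem foldl_guard {α σ : Type} (c : α → Bool) (g : σ → α → σ)
    (xs : List α) (s : σ) :
    xs.foldl (fun st x => if c x then g st x else st) s = (xs.filter c).foldl g s := by
  induction xs generalizing s with
  | nil => rfl
  | cons x t ih =>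
    simp only [List.foldl_cons, List.filter_cons]
    by_cases h : c x <;> simp [h, ih]

theorem foldl_max_le {α : Type} (P : α → Int) (t : List α) :
    ∀ (a : Int), a ≤ t.foldl (fun a x => max a (P x)) a := by
  induction t with
  | nil => intro a; simp
  | cons y s ihs =>
    intro a
    simp only [List.foldl_cons]
    exact le_trans (le_max_left a (P y)) (ihs (max a (P y)))

-- invariant of the unguarded update loop
theorem pvRun_some {α : Type} (P : α → Int) (q : List α) :
    ∀ (b : Int) (ws : List α),
    q.foldl (pvRun P) (some b, ws) =
      (some (q.foldl (fun a x => max a (P x)) b),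
       (if b = q.foldl (fun a x => max a (P x)) b then ws else []) ++
         q.filter (fun x => P x == q.foldl (fun a x => max a (P x)) b)) := by
  induction q with
  | nil => intro b ws; simp
  | cons x t ih =>
    intro b ws
    simp only [List.foldl_cons, pvRun, List.filter_cons]
    rcases lt_trichotomy b (P x) with h | h | h
    · rw [if_pos h]
      rw [ih (P x) [x]]
      have hm : max b (P x) = P x := max_eq_right h.le
      have hb : ¬ b = t.foldl (fun a x => max a (P x)) (P x) := by
        have := foldl_max_le P t (P x); omega
      simp only [hm]
      rw [if_neg hb]
      by_cases hPx : P x = t.foldl (fun a x => max a (P x)) (P x)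
      · rw [if_pos hPx, if_pos (beq_iff_eq.mpr hPx), List.singleton_append, List.nil_append]
      · rw [if_neg hPx, if_neg (by simpa using hPx), List.nil_append]
    · rw [if_neg (by omega), if_pos (by simp [h])]
      rw [ih b (ws ++ [x])]
      have hm : max b (P x) = b := by omega
      simp only [hm]
      by_cases h3 : b = t.foldl (fun a x => max a (P x)) b
      · rw [if_pos h3, if_pos h3, if_pos (beq_iff_eq.mpr (h ▸ h3)), List.append_assoc,
          List.singleton_append]
      · rw [if_neg h3, if_neg (show ¬ (P x == List.foldl (fun a x => max a (P x)) b t) = true by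
          simp only [beq_iff_eq]; omega), List.nil_append, if_neg h3, List.nil_append]
    · rw [if_neg (by omega), if_neg (show (P x == b) = true → False by
        simp only [beq_iff_eq]; omega)]
      rw [ih b ws]
      have hm : max b (P x) = b := by omega
      have hx : ¬ P x = t.foldl (fun a x => max a (P x)) b := by
        have := foldl_max_le P t b; omega
      simp only [hm]
      rw [if_neg (show ¬ (P x == List.foldl (fun a x => max a (P x)) b t) = true by
        simpa using hx)]

-- the canonical result both ports reduce to
theorem pvRun_none {α : Type} (P : α → Int) (q : List α) :
    ((q.foldl (pvRun P) (none, [])).2 : List α) =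
      match q with
      | [] => []
      | x :: t => q.filter (fun y => P y == t.foldl (fun a z => max a (P z)) (P x)) := by
  cases q with
  | nil => rfl
  | cons x t =>
    simp only [List.foldl_cons, pvRun]
    rw [pvRun_some]
    simp only [List.filter_cons]
    by_cases h : P x = t.foldl (fun a z => max a (P z)) (P x)
    · rw [if_pos h, if_pos (beq_iff_eq.mpr h), List.singleton_append]
    · rw [if_neg h, if_neg (by simpa using h), List.nil_append]

-- ===== VERDICT (by name: the statement is the Claim_ definition above) =====
theorem optimized_method_spec : Claim_equal_optimized_method := by
  intro labelings leaves root_idx _hDom _hPre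
  unfold Spec_optimized_method optimized_method optimized_method_alt
  -- collapse B's guarded fold to a fold over the qualifying sublist, then to the canonical form
  have hstep : pvStep leaves root_idx =
      fun st x => if pvQual leaves root_idx x then pvRun (fun y => pvLeafProd y leaves) st x else st := by
    funext st x; exact pvStep_eq leaves root_idx st x
  rw [hstep, foldl_guard, pvRun_none]
  -- collapse A's two filters to one filter by pvQual
  have hff : (labelings.filter (fun lbl => PySem.List.pyGetD lbl root_idx 0 == pvMaxD lbl)).filter
      (fun lbl => PySem.Int.mod (PySem.List.pyGetD lbl ((PySem.List.pyGet? leaves (-1)).getD 0) 0) 2 == 0)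
      = labelings.filter (pvQual leaves root_idx) := by
    rw [List.filter_filter]; rfl
  by_cases h1 : (labelings.filter (fun lbl => PySem.List.pyGetD lbl root_idx 0 == pvMaxD lbl)).isEmpty
  · have hq : labelings.filter (pvQual leaves root_idx) = [] := by
      rw [← hff]
      rw [List.isEmpty_iff] at h1
      simp [h1]
    simp [h1, hq]
  · rw [if_neg h1]
    simp only [hff]
    cases hq : labelings.filter (pvQual leaves root_idx) with
    | nil => simp
    | cons x t =>
      rw [if_neg (by simp)]
      simp only [List.map_cons]
      rw [PySem.List.max?_id_cons, Option.getD_some, List.foldl_map]
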